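-- pv_equiv track=rewrite | github.com/maziarkanani/MusicPTO | decoder.py | melody_to_midi_data
-- ===== SOURCE A (Python) =====
-- from typing import Dict, List, Tuple, Optional, Any
--
-- def melody_to_midi_data(
--     melody: List[Tuple[int, int]],
--     ticks_per_beat: int = 480,
--     velocity: int = 80
-- ) -> List[dict]:
--     """
--     Convert melody to simple MIDI note data.
--
--     Returns list of {'pitch': p, 'start': t, 'duration': d, 'velocity': v}
--     """
--     notes = []
--     current_time = 0
--
--     for pitch, duration in melody:
--         notes.append({
--             'pitch': pitch,
--             'start': current_time,
--             'duration': duration,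
--             'velocity': velocity
--         })
--         current_time += duration
--
--     return notes
-- ===== SOURCE B (Python) =====
-- def melody_to_midi_data(melody, ticks_per_beat=480, velocity=80):
--     # Pass 1: materialise all note start offsets as a prefix-sum table.
--     durations = [d for _, d in melody]
--     starts = [0] * len(melody)
--     for i in range(1, len(melody)):
--         starts[i] = starts[i - 1] + durations[i - 1]
--     # Pass 2: pair each note with its precomputed start.
--     return [
--         {'pitch': p, 'start': s, 'duration': d, 'velocity': velocity}
--         for (p, d), s in zip(melody, starts)
--     ]
-- ===== Notes on version B (the rewrite author's own statement) =====
-- stated objective: alternative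
-- what changed: B replaces A's single loop that threads a running current_time while emitting dicts by a two-pass decomposition: first a prefix-sum table of start offsets is built by index into a preallocated array, then the output is a zip of the melody with that table.
import Mathlib
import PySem

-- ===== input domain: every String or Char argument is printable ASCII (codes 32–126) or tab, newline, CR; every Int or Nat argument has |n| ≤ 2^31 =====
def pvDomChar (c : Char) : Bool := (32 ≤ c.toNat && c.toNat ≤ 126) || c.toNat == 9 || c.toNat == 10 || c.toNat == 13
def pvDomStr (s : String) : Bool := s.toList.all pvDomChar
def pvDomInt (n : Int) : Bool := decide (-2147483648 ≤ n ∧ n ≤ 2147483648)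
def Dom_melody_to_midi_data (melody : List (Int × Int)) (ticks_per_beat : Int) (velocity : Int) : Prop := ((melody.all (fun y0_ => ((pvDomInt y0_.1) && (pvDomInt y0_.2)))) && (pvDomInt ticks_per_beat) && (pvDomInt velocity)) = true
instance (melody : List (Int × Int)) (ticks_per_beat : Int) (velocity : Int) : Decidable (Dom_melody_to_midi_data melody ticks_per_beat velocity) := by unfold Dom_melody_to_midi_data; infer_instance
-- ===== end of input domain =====

-- B replaces A's emit loop threading a running current_time by a two-pass decomposition:
-- a prefix-sum table of starts built by index, then a zip of melody with that table (alternative decomposition, same cost).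

-- ===== PORT A =====
def melody_to_midi_data (melody : List (Int × Int)) (ticks_per_beat : Int) (velocity : Int) : List (List (String × Int)) :=
  (melody.foldl
    (fun (st : List (List (String × Int)) × Int) pd =>
      (st.1 ++ [[("pitch", pd.1), ("start", st.2), ("duration", pd.2), ("velocity", velocity)]],
       st.2 + pd.2))
    ([], 0)).1

-- ===== PORT B =====
def melody_to_midi_data_alt (melody : List (Int × Int)) (ticks_per_beat : Int) (velocity : Int) : List (List (String × Int)) :=
  let durations := melody.map Prod.snd
  let starts :=
    (PySem.List.pyRange 1 (melody.length : Int) 1).foldl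
      (fun (starts : List Int) i =>
        PySem.List.pySetD starts i
          (PySem.List.pyGetD starts (i - 1) 0 + PySem.List.pyGetD durations (i - 1) 0))
      (List.replicate melody.length (0 : Int))
  (melody.zip starts).map (fun x =>
    [("pitch", x.1.1), ("start", x.2), ("duration", x.1.2), ("velocity", velocity)])

-- ===== PRECONDITION & SPEC =====
def Spec_melody_to_midi_data (melody : List (Int × Int)) (ticks_per_beat : Int) (velocity : Int) (out : List (List (String × Int))) : Prop := out = melody_to_midi_data_alt melody ticks_per_beat velocity
instance (melody : List (Int × Int)) (ticks_per_beat : Int) (velocity : Int) (out : List (List (String × Int))) : Decidable (Spec_melody_to_midi_data melody ticks_per_beat velocity out) := by unfold Spec_melody_to_midi_data; infer_instance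

-- ===== CLAIM (what is proved, stated in full; the proofs are below) =====
def Claim_equal_melody_to_midi_data : Prop := ∀ (melody : List (Int × Int)) (ticks_per_beat : Int) (velocity : Int), Dom_melody_to_midi_data melody ticks_per_beat velocity → Spec_melody_to_midi_data melody ticks_per_beat velocity (melody_to_midi_data melody ticks_per_beat velocity)

-- ===== LEMMAS AND PROOFS =====

/-- the list of note start times: running prefix sums of the durations, seeded at `t` -/
def pvPsums : List Int → Int → List Int
  | [], _ => []
  | d :: rest, t => t :: pvPsums rest (t + d)

theorem pvPsums_length (ds : List Int) (t : Int) : (pvPsums ds t).length = ds.length := by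
  induction ds generalizing t with
  | nil => rfl
  | cons d rest ih => simp [pvPsums, ih]

theorem pvPsums_append_singleton (ds : List Int) (d t : Int) :
    pvPsums (ds ++ [d]) t = pvPsums ds t ++ [t + ds.sum] := by
  induction ds generalizing t with
  | nil => simp [pvPsums]
  | cons e rest ih => simp [pvPsums, ih, add_assoc]

theorem pvPsums_getD (ds : List Int) (t : Int) (j : Nat) (hj : j < ds.length) :
    (pvPsums ds t).getD j 0 = t + (ds.take j).sum := by
  induction ds generalizing t j with
  | nil => simp at hj
  | cons d rest ih =>
    cases j with
    | zero => simp [pvPsums]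
    | succ k =>
      simp only [pvPsums, List.getD_cons_succ, List.take_succ_cons, List.sum_cons]
      rw [ih (t + d) k (by simpa using hj)]
      ring

/-- A's emit loop: the running-time fold from state (acc, t) appends one entry per note,
    with starts exactly the prefix sums seeded at t. -/
theorem pvA_fold (velocity : Int) (melody : List (Int × Int))
    (acc : List (List (String × Int))) (t : Int) :
    (melody.foldl
      (fun (st : List (List (String × Int)) × Int) pd =>
        (st.1 ++ [[("pitch", pd.1), ("start", st.2), ("duration", pd.2), ("velocity", velocity)]],
         st.2 + pd.2))
      (acc, t)).1
    = acc ++ (melody.zip (pvPsums (melody.map Prod.snd) t)).map (fun x =>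
        [("pitch", x.1.1), ("start", x.2), ("duration", x.1.2), ("velocity", velocity)]) := by
  induction melody generalizing acc t with
  | nil => simp
  | cons pd rest ih =>
    simp only [List.foldl_cons, List.map_cons, pvPsums, List.zip_cons_cons, List.map]
    rw [ih]
    simp

/-- B's table-filling loop, characterised: after the whole index loop the table is pvPsums. -/
theorem pvB_fold_range (ds : List Int) (j : Nat) (hn : 1 ≤ ds.length) (hj : j ≤ ds.length - 1) :
    ((List.range j).map (fun k : Nat => (1 : Int) + (k : Int))).foldl
      (fun (starts : List Int) i =>
        PySem.List.pySetD starts i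
          (PySem.List.pyGetD starts (i - 1) 0 + PySem.List.pyGetD ds (i - 1) 0))
      (List.replicate ds.length (0 : Int))
    = pvPsums (ds.take (j + 1)) 0 ++ List.replicate (ds.length - 1 - j) 0 := by
  induction j with
  | zero =>
    simp only [List.range_zero, List.map_nil, List.foldl_nil]
    obtain ⟨d, rest, rfl⟩ : ∃ d rest, ds = d :: rest := by
      cases ds with
      | nil => simp at hn
      | cons d rest => exact ⟨d, rest, rfl⟩
    simp [pvPsums, List.replicate_succ]
  | succ k ih =>
    have hk : k ≤ ds.length - 1 := by omega
    have hk2 : k < ds.length := by omega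
    have hk3 : k + 1 < ds.length := by omega
    rw [List.range_succ, List.map_append, List.foldl_append, ih hk]
    simp only [List.map_cons, List.map_nil, List.foldl_cons, List.foldl_nil]
    have h1 : (1 : Int) + (k : Int) - 1 = ((k : Nat) : Int) := by ring
    have h2 : (1 : Int) + (k : Int) = (((k + 1 : Nat)) : Int) := by push_cast; ring
    rw [h1, h2, PySem.List.pyGetD_natCast, PySem.List.pyGetD_natCast, PySem.List.pySetD_natCast]
    have hlen : (pvPsums (ds.take (k + 1)) 0).length = k + 1 := by
      rw [pvPsums_length, List.length_take]; omega
    have hget : (pvPsums (ds.take (k + 1)) 0 ++ List.replicate (ds.length - 1 - k) 0).getD k 0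
        = (ds.take k).sum := by
      rw [List.getD_append _ _ _ _ (by omega)]
      rw [pvPsums_getD _ _ k (by rw [List.length_take]; omega)]
      rw [List.take_take]
      have hm : min k (k + 1) = k := by omega
      rw [hm, zero_add]
    have hgd : ds.getD k 0 = ds[k] := by
      simp [List.getD, List.getElem?_eq_getElem hk2]
    have hsum : (ds.take k).sum + ds.getD k 0 = (ds.take (k + 1)).sum := by
      rw [hgd, List.sum_take_succ _ _ hk2]
    have htake : ds.take (k + 1 + 1) = ds.take (k + 1) ++ [ds[k + 1]] := by
      rw [List.take_add_one, List.getElem?_eq_getElem hk3]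
      rfl
    rw [hget, hsum, htake, pvPsums_append_singleton, zero_add]
    -- set into the replicate tail
    have hrep : List.replicate (ds.length - 1 - k) (0 : Int)
        = 0 :: List.replicate (ds.length - 1 - (k + 1)) 0 := by
      have : ds.length - 1 - k = (ds.length - 1 - (k + 1)) + 1 := by omega
      rw [this, List.replicate_succ]
    rw [hrep]
    rw [List.set_append]
    simp [hlen]

/-- the final contents of B's starts table -/
theorem pvB_starts (ds : List Int) :
    (PySem.List.pyRange 1 (ds.length : Int) 1).foldl
      (fun (starts : List Int) i =>
        PySem.List.pySetD starts i
          (PySem.List.pyGetD starts (i - 1) 0 + PySem.List.pyGetD ds (i - 1) 0))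
      (List.replicate ds.length (0 : Int))
    = pvPsums ds 0 := by
  cases ds with
  | nil => simp [PySem.List.pyRange, pvPsums]
  | cons d rest =>
    rw [PySem.List.pyRange_one]
    have h : (((d :: rest).length : Int) - 1).toNat = (d :: rest).length - 1 := by
      simp
    rw [h]
    rw [pvB_fold_range (d :: rest) ((d :: rest).length - 1) (by simp) (le_refl _)]
    have h2 : (d :: rest).length - 1 + 1 = (d :: rest).length := by simp
    rw [h2, List.take_length]
    simp

-- ===== VERDICT (by name: the statement is the Claim_ definition above) =====
theorem melody_to_midi_data_spec : Claim_equal_melody_to_midi_data := by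
  intro melody ticks_per_beat velocity _
  simp only [Spec_melody_to_midi_data, melody_to_midi_data, melody_to_midi_data_alt]
  have hlen : (melody.map Prod.snd).length = melody.length := by simp
  rw [pvA_fold velocity melody [] 0]
  rw [show (melody.length : Int) = ((melody.map Prod.snd).length : Int) by rw [hlen],
      show List.replicate melody.length (0 : Int) = List.replicate (melody.map Prod.snd).length 0 by rw [hlen]]
  rw [pvB_starts (melody.map Prod.snd)]
  simp
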